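-- pv_equiv track=rewrite | github.com/ishika0102/learn | test code/main.py | solution
-- ===== SOURCE A (Python) =====
-- from typing import List
-- from collections import Counter
--
-- def solution(wood: List[int]) -> int:
--     if not wood:
--         return 0
--
--     # Filter elements to be within the valid range (2 to 200)
--     wood = [x for x in wood if 2 <= x <= 200]
--     if not wood:
--         return 0
--
--     # Count the occurrences of each integer
--     count = Counter(wood)
--
--     # Find the initial most frequent integer and its count
--     target, max_freq = count.most_common(1)[0]
--
--     # Initialize the maximum count with the most frequent element count
--     max_count = max_freq
--
--     # Create a set to keep track of which pairs have been checked
--     checked_pairs = set()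
--
--     for num in count:
--         for other in count:
--             if num == other or (num, other) in checked_pairs or (other, num) in checked_pairs:
--                 continue
--
--             # Mark this pair as checked
--             checked_pairs.add((num, other))
--
--             # If the sum of num and other equals any key in count, we can combine them
--             combined_sum = num + other
--             if combined_sum in count:
--                 max_count = max(max_count, count[combined_sum] + min(count[num], count[other]))
--
--     return max_count
-- ===== SOURCE B (Python) =====
-- from typing import List
--
-- def solution(wood: List[int]) -> int:
--     # Direct-indexed frequency array over the fixed value range 2..200;
--     # no Counter, no key loops, no dedup set.
--     counts = [0] * 201
--     for x in wood:
--         if 2 <= x <= 200: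
--             counts[x] += 1
--     best = max(counts)
--     for c in range(5, 201):          # smallest possible sum of two distinct keys is 2+3
--         if counts[c]:
--             for a in range(2, (c + 1) // 2):   # a < c - a, so pairs are enumerated once
--                 b = c - a
--                 if counts[a] and counts[b]:
--                     total = counts[c] + min(counts[a], counts[b])
--                     if total > best:
--                         best = total
--     return best
-- ===== Notes on version B (the rewrite author's own statement) =====
-- stated objective: alternative
-- what changed: B replaces the Counter dict, the nested key loops and the checked_pairs set with a fixed 201-slot direct-indexed frequency array, best = max(array), and a bounded numeric scan over sum targets c in 5..200 with complements a in 2..(c+1)//2, so each unordered pair is visited exactly once by construction.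
import Mathlib
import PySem

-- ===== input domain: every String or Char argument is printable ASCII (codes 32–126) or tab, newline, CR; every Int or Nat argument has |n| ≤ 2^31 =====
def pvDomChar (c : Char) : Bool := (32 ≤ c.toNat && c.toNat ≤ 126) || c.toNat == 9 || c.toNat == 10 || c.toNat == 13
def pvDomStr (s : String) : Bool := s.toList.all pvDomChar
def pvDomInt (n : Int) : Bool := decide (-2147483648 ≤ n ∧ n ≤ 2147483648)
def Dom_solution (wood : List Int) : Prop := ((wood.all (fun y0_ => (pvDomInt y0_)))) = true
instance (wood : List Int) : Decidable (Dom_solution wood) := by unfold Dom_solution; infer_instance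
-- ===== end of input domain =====

-- B replaces the Counter dict, the key loops and the checked_pairs set with a fixed
-- 201-slot frequency array and a bounded numeric scan over sum targets with half-range
-- complements (objective: alternative algorithmic structure, same overall cost).

-- ===== PORT A =====
def solution (wood : List Int) : Int :=
  if wood = [] then 0 else
  let wood2 := wood.filter (fun x => decide (2 ≤ x ∧ x ≤ 200))
  if wood2 = [] then 0 else
  let count := PySem.Dict.counter wood2
  -- most_common(1)[0]: first element of the items sorted by count descending (stable);
  -- the list is nonempty here, so headD's default is never used
  let max_freq := ((PySem.List.sorted count.items (fun p => p.2) true).headD (0, 0)).2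
  let res := count.keys.foldl (fun (st : PySem.Set (Int × Int) × Int) num =>
    count.keys.foldl (fun (st : PySem.Set (Int × Int) × Int) other =>
      if num = other ∨ (num, other) ∈ st.1 ∨ (other, num) ∈ st.1 then st
      else
        let checked := PySem.Set.add st.1 (num, other)
        let combined_sum := num + other
        if count.contains combined_sum then
          (checked, max st.2 (count.getD combined_sum 0 +
                              min (count.getD num 0) (count.getD other 0)))
        else (checked, st.2)) st)
    ((PySem.Set.empty : PySem.Set (Int × Int)), max_freq)
  res.2

-- ===== PORT B =====
def solution_alt (wood : List Int) : Int :=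
  -- counts = [0]*201; for x in wood: if 2 <= x <= 200: counts[x] += 1
  let counts := wood.foldl (fun l x =>
    if 2 ≤ x ∧ x ≤ 200 then PySem.List.pySetD l x (PySem.List.pyGetD l x 0 + 1) else l)
    (List.replicate 201 (0 : Int))
  -- max(counts): counts is a nonempty literal-length list, so getD's default is never used
  let best := (PySem.List.max? counts (fun y => y)).getD 0
  (PySem.List.pyRange 5 201 1).foldl (fun best c =>
    if PySem.List.pyGetD counts c 0 ≠ 0 then
      (PySem.List.pyRange 2 (PySem.Int.floordiv (c + 1) 2) 1).foldl (fun best a =>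
        let b := c - a
        if PySem.List.pyGetD counts a 0 ≠ 0 ∧ PySem.List.pyGetD counts b 0 ≠ 0 then
          let total := PySem.List.pyGetD counts c 0 +
            min (PySem.List.pyGetD counts a 0) (PySem.List.pyGetD counts b 0)
          if total > best then total else best
        else best) best
    else best) best

-- ===== PRECONDITION & SPEC =====
def Spec_solution (wood : List Int) (out : Int) : Prop := out = solution_alt wood
instance (wood : List Int) (out : Int) : Decidable (Spec_solution wood out) := by unfold Spec_solution; infer_instance

-- ===== CLAIM (what is proved, stated in full; the proofs are below) =====
def Claim_equal_solution : Prop := ∀ (wood : List Int), Dom_solution wood → Spec_solution wood (solution wood)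

-- ===== LEMMAS AND PROOFS =====

-- candidate value for an unordered pair {a, b} of keys whose sum is also a key
def pv (w : List Int) (a b : Int) : Int :=
  ((PySem.Dict.counter w).getD (a + b) 0) +
    min ((PySem.Dict.counter w).getD a 0) ((PySem.Dict.counter w).getD b 0)

lemma pv_symm (w : List Int) (a b : Int) : pv w a b = pv w b a := by
  simp [pv, Int.add_comm, min_comm]

-- A's inner-loop step (exactly the inner lambda of port A)
def stepI (count : PySem.Dict Int Int) (num : Int)
    (st : PySem.Set (Int × Int) × Int) (other : Int) : PySem.Set (Int × Int) × Int :=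
  if num = other ∨ (num, other) ∈ st.1 ∨ (other, num) ∈ st.1 then st
  else
    let checked := PySem.Set.add st.1 (num, other)
    let combined_sum := num + other
    if count.contains combined_sum then
      (checked, max st.2 (count.getD combined_sum 0 +
                          min (count.getD num 0) (count.getD other 0)))
    else (checked, st.2)

-- generic facts about "running max"-style folds (step never decreases the accumulator)
lemma le_foldl_of_infl {α : Type} (g : Int → α → Int) (h : ∀ a x, a ≤ g a x) :
    ∀ (L : List α) (a : Int), a ≤ L.foldl g a := by
  intro L
  induction L with
  | nil => intro a; simp
  | cons x t ih => intro a; exact le_trans (h a x) (ih (g a x))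

lemma foldl_le_of_bound {α : Type} (g : Int → α → Int) (M : Int) :
    ∀ (L : List α) (a : Int), (∀ b x, x ∈ L → b ≤ M → g b x ≤ M) → a ≤ M → L.foldl g a ≤ M := by
  intro L
  induction L with
  | nil => intro a _ ha; simpa using ha
  | cons x t ih =>
      intro a h ha
      exact ih (g a x) (fun b y hy => h b y (List.mem_cons_of_mem _ hy)) (h a x List.mem_cons_self ha)

lemma le_foldl_of_mem {α : Type} (g : Int → α → Int) (h : ∀ a x, a ≤ g a x) (v : Int) :
    ∀ (L : List α) (x : α), x ∈ L → (∀ a, v ≤ g a x) → ∀ a, v ≤ L.foldl g a := by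
  intro L
  induction L with
  | nil => intro x hx; simp at hx
  | cons y t ih =>
      intro x hx hv a
      rcases List.mem_cons.mp hx with rfl | hx
      · exact le_trans (hv a) (le_foldl_of_infl g h t (g a x))
      · exact ih x hx hv (g a y)

lemma foldl_id {α : Type} (g : Int → α → Int) :
    ∀ (L : List α) (a : Int), (∀ x ∈ L, ∀ b, g b x = b) → L.foldl g a = a := by
  intro L
  induction L with
  | nil => intro a _; rfl
  | cons x t ih =>
      intro a h
      simp only [List.foldl_cons, h x List.mem_cons_self a]
      exact ih a (fun y hy => h y (List.mem_cons_of_mem _ hy))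

-- the pure (set-free) version of A's double loop
def pureInner (w : List Int) (num : Int) (K : List Int) (acc : Int) : Int :=
  K.foldl (fun acc other =>
    if num = other then acc
    else if (PySem.Dict.counter w).contains (num + other) then max acc (pv w num other)
    else acc) acc

def pureA (w : List Int) (K : List Int) (acc : Int) : Int :=
  K.foldl (fun acc num => pureInner w num K acc) acc

lemma pureInner_step_infl (w : List Int) (num : Int) (a other : Int) :
    a ≤ (if num = other then a
         else if (PySem.Dict.counter w).contains (num + other) then max a (pv w num other)
         else a) := by
  split_ifs <;> simp

lemma le_pureInner (w : List Int) (num : Int) (K : List Int) (acc : Int) :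
    acc ≤ pureInner w num K acc :=
  le_foldl_of_infl _ (pureInner_step_infl w num) K acc

-- invariant: every pair already in the checked set whose sum is a key has its value ≤ acc
def InvA (w : List Int) (S : PySem.Set (Int × Int)) (acc : Int) : Prop :=
  ∀ p ∈ S, (PySem.Dict.counter w).contains (p.1 + p.2) = true → pv w p.1 p.2 ≤ acc

-- A's inner loop with the checked set computes pureInner and preserves the invariant
lemma innerA_eq_pure (w : List Int) (num : Int) :
    ∀ (L : List Int) (S : PySem.Set (Int × Int)) (acc : Int), InvA w S acc →
      (L.foldl (stepI (PySem.Dict.counter w) num) (S, acc)).2 = pureInner w num L acc ∧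
      InvA w (L.foldl (stepI (PySem.Dict.counter w) num) (S, acc)).1
             (L.foldl (stepI (PySem.Dict.counter w) num) (S, acc)).2 := by
  intro L
  induction L with
  | nil => intro S acc h; exact ⟨rfl, h⟩
  | cons other t ih =>
      intro S acc h
      simp only [List.foldl_cons]
      by_cases h1 : num = other
      · have hstep : stepI (PySem.Dict.counter w) num (S, acc) other = (S, acc) := by
          simp [stepI, h1]
        have hp : pureInner w num (other :: t) acc = pureInner w num t acc := by
          simp [pureInner, h1]
        rw [hstep, hp]
        exact ih S acc h
      · by_cases h2 : (num, other) ∈ S ∨ (other, num) ∈ S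
        · have hstep : stepI (PySem.Dict.counter w) num (S, acc) other = (S, acc) := by
            simp only [stepI]
            rw [if_pos (Or.inr h2)]
          have hdom : (PySem.Dict.counter w).contains (num + other) = true →
              pv w num other ≤ acc := by
            intro hc
            rcases h2 with hm | hm
            · exact h (num, other) hm hc
            · have := h (other, num) hm (by simpa [Int.add_comm] using hc)
              simpa [pv_symm] using this
          have hp : pureInner w num (other :: t) acc = pureInner w num t acc := by
            simp only [pureInner, List.foldl_cons]
            by_cases hc : (PySem.Dict.counter w).contains (num + other) = true
            · rw [if_neg h1, if_pos hc, max_eq_left (hdom hc)]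
            · simp [h1, hc]
          rw [hstep, hp]
          exact ih S acc h
        · rw [not_or] at h2
          have hstep : stepI (PySem.Dict.counter w) num (S, acc) other =
              (PySem.Set.add S (num, other),
               if (PySem.Dict.counter w).contains (num + other) then max acc (pv w num other)
               else acc) := by
            simp only [stepI]
            rw [if_neg (by rw [not_or, not_or]; exact ⟨h1, h2.1, h2.2⟩)]
            by_cases hc : (PySem.Dict.counter w).contains (num + other) = true
            · simp [hc, pv]
            · simp [hc]
          set acc' : Int :=
            if (PySem.Dict.counter w).contains (num + other) then max acc (pv w num other)
            else acc with hacc'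
          have hle : acc ≤ acc' := by
            rw [hacc']; split_ifs <;> simp
          have hinv : InvA w (PySem.Set.add S (num, other)) acc' := by
            intro p hp hc
            rcases (PySem.Set.mem_add S (num, other) p).mp hp with hm | rfl
            · exact le_trans (h p hm hc) hle
            · rw [hacc', if_pos hc]; exact le_max_right _ _
          have hp : pureInner w num (other :: t) acc = pureInner w num t acc' := by
            simp only [pureInner, List.foldl_cons, if_neg h1]
            rw [hacc']
          rw [hstep, hp]
          exact ih _ acc' hinv

-- A's outer loop with the checked set computes pureA
lemma outerA_eq_pure (w : List Int) (K : List Int) :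
    ∀ (L : List Int) (S : PySem.Set (Int × Int)) (acc : Int), InvA w S acc →
      (L.foldl (fun st num => K.foldl (stepI (PySem.Dict.counter w) num) st) (S, acc)).2 =
        L.foldl (fun acc num => pureInner w num K acc) acc := by
  intro L
  induction L with
  | nil => intro S acc _; rfl
  | cons num t ih =>
      intro S acc h
      simp only [List.foldl_cons]
      obtain ⟨h1, h2⟩ := innerA_eq_pure w num K S acc h
      have hsplit : K.foldl (stepI (PySem.Dict.counter w) num) (S, acc) =
          ((K.foldl (stepI (PySem.Dict.counter w) num) (S, acc)).1,
           pureInner w num K acc) := by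
        rw [← h1]
      rw [hsplit]
      rw [h1] at h2
      exact ih _ _ h2

-- every (unordered, distinct, sum-in-count) candidate value is ≤ pureA's result
lemma cand_le_pureA (w K : List Int)
    (a b : Int) (ha : a ∈ K) (hb : b ∈ K) (hne : a ≠ b)
    (hsum : (PySem.Dict.counter w).contains (a + b) = true) (m : Int) :
    pv w a b ≤ pureA w K m := by
  refine le_foldl_of_mem _ (fun s x => le_pureInner w x K s)
    (pv w a b) K a ha (fun acc => ?_) m
  refine le_foldl_of_mem _ (pureInner_step_infl w a)
    (pv w a b) K b hb (fun acc' => ?_) acc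
  rw [if_neg hne, if_pos hsum]
  exact le_max_right _ _

-- A's initial accumulator (head of items sorted by count descending)
-- equals max over the counter's values, for a nonempty source list
lemma init_eq (w : List Int) (hw : w ≠ []) :
    ((PySem.List.sorted (PySem.Dict.counter w).items (fun p => p.2) true).headD (0, 0)).2 =
      (PySem.List.max? (PySem.Dict.counter w).values (fun y => y)).getD 0 := by
  have hitems : (PySem.Dict.counter w).items ≠ [] := by
    rw [PySem.Dict.items_counter]
    intro hcon
    rcases List.exists_mem_of_ne_nil w hw with ⟨x, hx⟩
    have : x ∈ PySem.Set.ofList w := (PySem.Set.mem_ofList w x).mpr hx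
    rcases List.map_eq_nil_iff.mp hcon with h
    simp [h] at this
  have hsne : PySem.List.sorted (PySem.Dict.counter w).items (fun p => p.2) true ≠ [] := by
    intro hcon
    exact hitems ((PySem.List.sorted_eq_nil_iff _ _ _).mp hcon)
  rcases List.exists_cons_of_ne_nil hsne with ⟨hd, tl, hs⟩
  have hvals : (PySem.Dict.counter w).values = (PySem.Dict.counter w).items.map (fun p => p.2) := rfl
  have hvne : (PySem.Dict.counter w).values ≠ [] := by
    rw [hvals]
    simpa using hitems
  obtain ⟨mu, hmu⟩ : ∃ mu, PySem.List.max? (PySem.Dict.counter w).values (fun y => y) = some mu := by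
    cases hcase : PySem.List.max? (PySem.Dict.counter w).values (fun y => y) with
    | none => exact absurd ((PySem.List.max?_eq_none_iff _ _).mp hcase) hvne
    | some mu => exact ⟨mu, rfl⟩
  rw [hs, hmu]
  simp only [List.headD_cons, Option.getD_some]
  apply le_antisymm
  · have hhd : hd ∈ (PySem.Dict.counter w).items := by
      have : hd ∈ PySem.List.sorted (PySem.Dict.counter w).items (fun p => p.2) true := by
        rw [hs]; exact List.mem_cons_self
      exact (PySem.List.mem_sorted _ _ _ _).mp this
    have : hd.2 ∈ (PySem.Dict.counter w).values := by
      rw [hvals]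
      exact List.mem_map_of_mem hhd
    exact PySem.List.max?_isMax hmu hd.2 this
  · have hmem : mu ∈ (PySem.Dict.counter w).values := PySem.List.max?_mem hmu
    rw [hvals] at hmem
    rcases List.mem_map.mp hmem with ⟨p, hp, rfl⟩
    exact PySem.List.key_head_sorted_rev_ge _ _ hs p hp

-- ========== B-side ==========

-- the filtering predicate, B's array-building step, and the pieces of port B, named
def bpred (x : Int) : Bool := decide (2 ≤ x ∧ x ≤ 200)

def bstep (l : List Int) (x : Int) : List Int :=
  if 2 ≤ x ∧ x ≤ 200 then PySem.List.pySetD l x (PySem.List.pyGetD l x 0 + 1) else l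

def bcounts (wood : List Int) : List Int :=
  wood.foldl bstep (List.replicate 201 (0 : Int))

def stepCI (counts : List Int) (c : Int) (best a : Int) : Int :=
  let b := c - a
  if PySem.List.pyGetD counts a 0 ≠ 0 ∧ PySem.List.pyGetD counts b 0 ≠ 0 then
    let total := PySem.List.pyGetD counts c 0 +
      min (PySem.List.pyGetD counts a 0) (PySem.List.pyGetD counts b 0)
    if total > best then total else best
  else best

def foldC (counts : List Int) (best : Int) : Int :=
  (PySem.List.pyRange 5 201 1).foldl (fun best c =>
    if PySem.List.pyGetD counts c 0 ≠ 0 then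
      (PySem.List.pyRange 2 (PySem.Int.floordiv (c + 1) 2) 1).foldl (stepCI counts c) best
    else best) best

lemma alt_unfold (wood : List Int) :
    solution_alt wood =
      foldC (bcounts wood) ((PySem.List.max? (bcounts wood) (fun y => y)).getD 0) := rfl

lemma stepCI_infl (counts : List Int) (c best a : Int) : best ≤ stepCI counts c best a := by
  simp only [stepCI]
  split_ifs <;> omega

lemma outerC_infl (counts : List Int) (best c : Int) :
    best ≤ (if PySem.List.pyGetD counts c 0 ≠ 0 then
      (PySem.List.pyRange 2 (PySem.Int.floordiv (c + 1) 2) 1).foldl (stepCI counts c) best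
    else best) := by
  split_ifs
  · exact le_foldl_of_infl _ (stepCI_infl counts c) _ best
  · exact le_refl _

-- the built array holds the frequency of each in-range value in the filtered list
lemma build_spec : ∀ (ws l : List Int), l.length = 201 →
    (ws.foldl bstep l).length = 201 ∧
    ∀ i : Nat, i < 201 →
      (ws.foldl bstep l).getD i 0 = l.getD i 0 + ((ws.filter bpred).count ((i : Nat) : Int) : Int) := by
  intro ws
  induction ws with
  | nil => intro l hl; exact ⟨hl, by simp⟩
  | cons x t ih =>
      intro l hl
      by_cases hx : 2 ≤ x ∧ x ≤ 200
      · have hx0 : 0 ≤ x := by omega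
        have hxlt : x.toNat < l.length := by omega
        have hset : bstep l x = l.set x.toNat (PySem.List.pyGetD l x 0 + 1) := by
          rw [bstep, if_pos hx, PySem.List.pySetD_of_nonneg l _ hx0]
        have hlen' : (bstep l x).length = 201 := by
          rw [hset, List.length_set, hl]
        obtain ⟨hL, hG⟩ := ih (bstep l x) hlen'
        refine ⟨by simpa using hL, fun i hi => ?_⟩
        have hfc : (x :: t).filter bpred = x :: t.filter bpred := by
          simp [bpred, hx.1, hx.2]
        have hstep : (x :: t).foldl bstep l = t.foldl bstep (bstep l x) := rfl
        rw [hstep, hG i hi, hfc]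
        have hget : PySem.List.pyGetD l x 0 = l.getD x.toNat 0 := by
          rw [PySem.List.pyGetD_eq_getElem l 0 hx0 (by rw [hl]; exact_mod_cast by omega)]
          rw [List.getD_eq_getElem l 0 hxlt]
        by_cases hix : i = x.toNat
        · have hie : ((i : Nat) : Int) = x := by omega
          have hilt : i < l.length := by omega
          rw [hie, List.count_cons_self, hset,
              List.getD_eq_getElem _ 0 (by rw [List.length_set]; exact hilt)]
          subst hix
          rw [List.getElem_set_self (by rw [List.length_set]; exact hxlt), hget]
          push_cast
          ring
        · have hne : ((i : Nat) : Int) ≠ x := by omega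
          rw [List.count_cons_of_ne (Ne.symm hne), hset]
          have h1 : (l.set x.toNat (PySem.List.pyGetD l x 0 + 1)).getD i 0 = l.getD i 0 := by
            rcases lt_or_ge i l.length with hlt | hge
            · rw [List.getD_eq_getElem _ 0 (by rw [List.length_set]; exact hlt),
                  List.getElem_set_ne (Ne.symm hix), List.getD_eq_getElem _ 0 hlt]
            · rw [List.getD_eq_default _ 0 (by rw [List.length_set]; exact hge),
                  List.getD_eq_default _ 0 hge]
          rw [h1]
      · have hstep : bstep l x = l := by simp [bstep, hx]
        have hfc : (x :: t).filter bpred = t.filter bpred := by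
          simp only [List.filter_cons]
          have : bpred x = false := by simp [bpred]; omega
          rw [this]; simp
        obtain ⟨hL, hG⟩ := ih l hl
        have hrw : (x :: t).foldl bstep l = t.foldl bstep l := by
          simp [List.foldl_cons, hstep]
        refine ⟨by rw [hrw]; exact hL, fun i hi => ?_⟩
        rw [hrw, hfc]
        exact hG i hi

lemma bcounts_length (wood : List Int) : (bcounts wood).length = 201 :=
  (build_spec wood (List.replicate 201 0) (by rw [List.length_replicate])).1

lemma bcounts_getD (wood : List Int) (i : Nat) (hi : i < 201) :
    (bcounts wood).getD i 0 = ((wood.filter bpred).count ((i : Nat) : Int) : Int) := by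
  have := (build_spec wood (List.replicate 201 0) (by rw [List.length_replicate])).2 i hi
  rw [bcounts, this, List.getD_replicate 0 hi]
  simp

-- pyGetD of the built array at an in-range Int index is the count in the filtered list
lemma bcounts_at (wood : List Int) (v : Int) (h0 : 0 ≤ v) (h1 : v < 201) :
    PySem.List.pyGetD (bcounts wood) v 0 = ((wood.filter bpred).count v : Int) := by
  have hlen : (bcounts wood).length = 201 := bcounts_length wood
  rw [PySem.List.pyGetD_eq_getElem _ 0 h0 (by rw [hlen]; exact_mod_cast h1)]
  have hnat : v.toNat < 201 := by omega
  have hvv : ((v.toNat : Nat) : Int) = v := by omega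
  have := bcounts_getD wood v.toNat hnat
  rw [List.getD_eq_getElem _ 0 (by omega), hvv] at this
  rw [this]

-- every element of the built array is the count of its own index
lemma bcounts_mem (wood : List Int) (e : Int) (he : e ∈ bcounts wood) :
    ∃ v : Int, 0 ≤ v ∧ v < 201 ∧ e = ((wood.filter bpred).count v : Int) := by
  rcases List.mem_iff_getElem.mp he with ⟨i, hi, rfl⟩
  have hi201 : i < 201 := by rw [bcounts_length wood] at hi; exact hi
  refine ⟨(i : Int), by omega, by omega, ?_⟩
  have := bcounts_getD wood i hi201
  rw [List.getD_eq_getElem _ 0 hi] at this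
  exact this

-- all elements of the filtered list lie in [2, 200]
lemma mem_filter_range (wood : List Int) (v : Int) (hv : v ∈ wood.filter bpred) :
    2 ≤ v ∧ v ≤ 200 := by
  have := List.of_mem_filter hv
  simpa [bpred] using this

-- B's initial best equals the max of the counter's values (nonempty filtered list)
lemma binit_eq (wood : List Int) (hf : wood.filter bpred ≠ []) :
    (PySem.List.max? (bcounts wood) (fun y => y)).getD 0 =
      (PySem.List.max? (PySem.Dict.counter (wood.filter bpred)).values (fun y => y)).getD 0 := by
  have hcne : bcounts wood ≠ [] := by
    intro hcon
    have := bcounts_length wood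
    rw [hcon] at this
    simp at this
  obtain ⟨m, hm⟩ : ∃ m, PySem.List.max? (bcounts wood) (fun y => y) = some m := by
    cases hcase : PySem.List.max? (bcounts wood) (fun y => y) with
    | none => exact absurd ((PySem.List.max?_eq_none_iff _ _).mp hcase) hcne
    | some m => exact ⟨m, rfl⟩
  have hvals : (PySem.Dict.counter (wood.filter bpred)).values =
      (PySem.Set.ofList (wood.filter bpred)).map (fun k => ((wood.filter bpred).count k : Int)) := by
    show ((PySem.Dict.counter (wood.filter bpred)).items.map (fun p => p.2)) = _
    rw [PySem.Dict.items_counter, List.map_map]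
    rfl
  have hvne : (PySem.Dict.counter (wood.filter bpred)).values ≠ [] := by
    rw [hvals]
    intro hcon
    rcases List.exists_mem_of_ne_nil _ hf with ⟨x, hx⟩
    have hx' : x ∈ PySem.Set.ofList (wood.filter bpred) :=
      (PySem.Set.mem_ofList _ x).mpr hx
    rcases List.map_eq_nil_iff.mp hcon with h
    simp [h] at hx'
  obtain ⟨mu, hmu⟩ : ∃ mu,
      PySem.List.max? (PySem.Dict.counter (wood.filter bpred)).values (fun y => y) = some mu := by
    cases hcase : PySem.List.max? (PySem.Dict.counter (wood.filter bpred)).values (fun y => y) with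
    | none => exact absurd ((PySem.List.max?_eq_none_iff _ _).mp hcase) hvne
    | some mu => exact ⟨mu, rfl⟩
  have hmu_nonneg : 0 ≤ mu := by
    have hmem : mu ∈ (PySem.Dict.counter (wood.filter bpred)).values := PySem.List.max?_mem hmu
    rw [hvals] at hmem
    rcases List.mem_map.mp hmem with ⟨k, _, rfl⟩
    positivity
  rw [hm, hmu]
  simp only [Option.getD_some]
  apply le_antisymm
  · -- m is a count (wood.filter bpred).count v; if v occurs it is a value, else m = 0 ≤ mu
    rcases bcounts_mem wood m (PySem.List.max?_mem hm) with ⟨v, hv0, hv1, rfl⟩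
    by_cases hvw : v ∈ wood.filter bpred
    · apply PySem.List.max?_isMax hmu
      rw [hvals]
      exact List.mem_map.mpr ⟨v, (PySem.Set.mem_ofList _ v).mpr hvw, rfl⟩
    · rw [List.count_eq_zero.mpr hvw]
      exact_mod_cast hmu_nonneg
  · -- mu = count of a key k ∈ wood.filter bpred ⊆ [2,200], so it is an element of bcounts
    have hmem : mu ∈ (PySem.Dict.counter (wood.filter bpred)).values := PySem.List.max?_mem hmu
    rw [hvals] at hmem
    rcases List.mem_map.mp hmem with ⟨k, hk, rfl⟩
    have hkw : k ∈ wood.filter bpred := (PySem.Set.mem_ofList _ k).mp hk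
    have hkr := mem_filter_range wood k hkw
    apply PySem.List.max?_isMax hm
    have hat := bcounts_at wood k (by omega) (by omega)
    rw [← hat]
    exact PySem.List.pyGetD_mem _ 0
      (by rw [bcounts_length]; simp only [PySem.Raise.InRange]; omega)

-- keys of the counter are exactly the elements of the filtered list
lemma contains_iff_memK (w K : List Int) (hK : ∀ x, x ∈ K ↔ x ∈ w) (v : Int) :
    (PySem.Dict.counter w).contains v = true ↔ v ∈ K := by
  rw [PySem.Dict.contains_counter, List.contains_iff_mem, hK]

-- an A-candidate with a < b is ≤ foldC's result
lemma cand_le_foldC_aux (wood : List Int) (K : List Int)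
    (hK : ∀ x, x ∈ K ↔ x ∈ wood.filter bpred)
    (a b : Int) (ha : a ∈ K) (hb : b ∈ K) (hlt : a < b) (hab : (a + b) ∈ K) (m : Int) :
    pv (wood.filter bpred) a b ≤ foldC (bcounts wood) m := by
  have hra := mem_filter_range wood a ((hK a).mp ha)
  have hrb := mem_filter_range wood b ((hK b).mp hb)
  have hrc := mem_filter_range wood (a + b) ((hK (a + b)).mp hab)
  -- a + b is visited by the outer range
  have hcrange : a + b ∈ PySem.List.pyRange 5 201 1 := by
    rw [PySem.List.mem_pyRange_one]
    omega
  refine le_foldl_of_mem _ (fun s x => outerC_infl (bcounts wood) s x) _ _ (a + b) hcrange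
    (fun acc => ?_) m
  -- counts[a+b] ≠ 0
  have hcnz : PySem.List.pyGetD (bcounts wood) (a + b) 0 ≠ 0 := by
    rw [bcounts_at wood (a + b) (by omega) (by omega)]
    have hp : 0 < (wood.filter bpred).count (a + b) := List.count_pos_iff.mpr ((hK _).mp hab)
    omega
  rw [if_pos hcnz]
  -- a is visited by the inner range
  have harange : a ∈ PySem.List.pyRange 2 (PySem.Int.floordiv (a + b + 1) 2) 1 := by
    rw [PySem.List.mem_pyRange_one]
    refine ⟨by omega, ?_⟩
    have : a + 1 ≤ PySem.Int.floordiv (a + b + 1) 2 := by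
      rw [PySem.Int.le_floordiv_iff_mul_le (by omega)]
      omega
    omega
  refine le_foldl_of_mem _ (stepCI_infl (bcounts wood) (a + b)) _ _ a harange
    (fun acc' => ?_) acc
  -- the step at a produces exactly the candidate value
  have hnza : PySem.List.pyGetD (bcounts wood) a 0 ≠ 0 := by
    rw [bcounts_at wood a (by omega) (by omega)]
    have hp : 0 < (wood.filter bpred).count a := List.count_pos_iff.mpr ((hK a).mp ha)
    omega
  have hnzb : PySem.List.pyGetD (bcounts wood) (a + b - a) 0 ≠ 0 := by
    have hba : a + b - a = b := by ring
    rw [hba, bcounts_at wood b (by omega) (by omega)]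
    have hp : 0 < (wood.filter bpred).count b := List.count_pos_iff.mpr ((hK b).mp hb)
    omega
  simp only [stepCI]
  rw [if_pos ⟨hnza, hnzb⟩]
  have hval : PySem.List.pyGetD (bcounts wood) (a + b) 0 +
      min (PySem.List.pyGetD (bcounts wood) a 0)
          (PySem.List.pyGetD (bcounts wood) (a + b - a) 0) =
      pv (wood.filter bpred) a b := by
    have hba : a + b - a = b := by ring
    rw [hba, bcounts_at wood (a + b) (by omega) (by omega),
        bcounts_at wood a (by omega) (by omega), bcounts_at wood b (by omega) (by omega)]
    simp only [pv, PySem.Dict.getD_counter]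
  rw [hval]
  split_ifs <;> omega

-- pureA's result is ≤ foldC's result
lemma pureA_le_foldC (wood : List Int) (K : List Int)
    (hK : ∀ x, x ∈ K ↔ x ∈ wood.filter bpred) (m : Int) :
    pureA (wood.filter bpred) K m ≤ foldC (bcounts wood) m := by
  have hinit : m ≤ foldC (bcounts wood) m :=
    le_foldl_of_infl _ (fun s x => outerC_infl (bcounts wood) s x) _ m
  refine foldl_le_of_bound _ _ K m (fun acc num hnum hacc => ?_) hinit
  refine foldl_le_of_bound _ _ K acc (fun acc' other hother hacc' => ?_) hacc
  by_cases h1 : num = other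
  · rw [if_pos h1]; exact hacc'
  · rw [if_neg h1]
    by_cases hcsum : (PySem.Dict.counter (wood.filter bpred)).contains (num + other) = true
    · rw [if_pos hcsum]
      refine max_le hacc' ?_
      have habK : (num + other) ∈ K := (contains_iff_memK _ K hK _).mp hcsum
      rcases Int.lt_or_lt_of_ne h1 with hlt | hlt
      · exact cand_le_foldC_aux wood K hK num other hnum hother hlt habK m
      · rw [pv_symm]
        have hco : other + num ∈ K := by rwa [Int.add_comm] at habK
        exact cand_le_foldC_aux wood K hK other num hother hnum hlt hco m
    · rw [if_neg hcsum]; exact hacc'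

-- foldC's result is ≤ pureA's result
lemma foldC_le_pureA (wood : List Int) (K : List Int)
    (hK : ∀ x, x ∈ K ↔ x ∈ wood.filter bpred) (m : Int) :
    foldC (bcounts wood) m ≤ pureA (wood.filter bpred) K m := by
  have hinit : m ≤ pureA (wood.filter bpred) K m :=
    le_foldl_of_infl _ (fun s x => le_pureInner (wood.filter bpred) x K s) K m
  refine foldl_le_of_bound _ _ _ m (fun acc c hc hacc => ?_) hinit
  by_cases hcz : PySem.List.pyGetD (bcounts wood) c 0 ≠ 0
  · rw [if_pos hcz]
    have hcR := PySem.List.mem_pyRange_one.mp hc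
    refine foldl_le_of_bound _ _ _ acc (fun acc' a ha hacc' => ?_) hacc
    have haR := PySem.List.mem_pyRange_one.mp ha
    have haup : a + 1 ≤ PySem.Int.floordiv (c + 1) 2 := by omega
    rw [PySem.Int.le_floordiv_iff_mul_le (by omega)] at haup
    -- so 2a < c, i.e. a < c - a
    simp only [stepCI]
    by_cases hcond : PySem.List.pyGetD (bcounts wood) a 0 ≠ 0 ∧
        PySem.List.pyGetD (bcounts wood) (c - a) 0 ≠ 0
    · rw [if_pos hcond]
      have hcv := bcounts_at wood c (by omega) (by omega)
      have hav := bcounts_at wood a (by omega) (by omega)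
      have hbv := bcounts_at wood (c - a) (by omega) (by omega)
      have hcK : c ∈ K := by
        rw [hK, ← List.count_pos_iff]
        rw [hcv] at hcz
        omega
      have haK : a ∈ K := by
        rw [hK, ← List.count_pos_iff]
        have h2 := hcond.1; rw [hav] at h2; omega
      have hbK : (c - a) ∈ K := by
        rw [hK, ← List.count_pos_iff]
        have h2 := hcond.2; rw [hbv] at h2; omega
      have hne : a ≠ c - a := by omega
      have hsum : (PySem.Dict.counter (wood.filter bpred)).contains (a + (c - a)) = true := by
        rw [contains_iff_memK _ K hK]
        have hac : a + (c - a) = c := by ring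
        rw [hac]; exact hcK
      have hcand := cand_le_pureA (wood.filter bpred) K a (c - a) haK hbK hne hsum m
      have hval : PySem.List.pyGetD (bcounts wood) c 0 +
          min (PySem.List.pyGetD (bcounts wood) a 0)
              (PySem.List.pyGetD (bcounts wood) (c - a) 0) =
          pv (wood.filter bpred) a (c - a) := by
        rw [hcv, hav, hbv]
        simp only [pv, PySem.Dict.getD_counter]
        have hac : a + (c - a) = c := by ring
        rw [hac]
      split_ifs with hgt
      · rw [hval]; exact hcand
      · exact hacc'
    · rw [if_neg hcond]; exact hacc'
  · rw [if_neg hcz]; exact hacc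

-- on an empty filtered list B returns 0
lemma alt_zero (wood : List Int) (hf : wood.filter bpred = []) : solution_alt wood = 0 := by
  rw [alt_unfold]
  have hcz : ∀ v : Int, 0 ≤ v → v < 201 → PySem.List.pyGetD (bcounts wood) v 0 = 0 := by
    intro v h0 h1
    rw [bcounts_at wood v h0 h1, hf]
    simp
  have hmz : (PySem.List.max? (bcounts wood) (fun y => y)).getD 0 = 0 := by
    cases hcase : PySem.List.max? (bcounts wood) (fun y => y) with
    | none => rfl
    | some m =>
        rcases bcounts_mem wood m (PySem.List.max?_mem hcase) with ⟨v, _, _, rfl⟩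
        rw [hf]
        simp
  rw [hmz, foldC]
  apply foldl_id
  intro c hc b
  have hcR := PySem.List.mem_pyRange_one.mp hc
  rw [if_neg (by rw [hcz c (by omega) (by omega)]; simp)]

-- ===== VERDICT (by name: the statement is the Claim_ definition above) =====
theorem solution_spec : Claim_equal_solution := by
  intro wood _
  unfold Spec_solution
  by_cases hw : wood = []
  · subst hw
    rw [alt_zero [] rfl]
    simp [solution]
  · by_cases hf : wood.filter (fun x => decide (2 ≤ x ∧ x ≤ 200)) = []
    · rw [alt_zero wood (by simpa [bpred] using hf)]
      unfold solution
      rw [if_neg hw, if_pos hf]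
    · -- nonempty case
      have hfb : wood.filter bpred ≠ [] := by simpa [bpred] using hf
      set w := wood.filter bpred with hwdef
      have hweq : wood.filter (fun x => decide (2 ≤ x ∧ x ≤ 200)) = w := rfl
      set K := (PySem.Dict.counter w).keys with hKdef
      have hK : ∀ x, x ∈ K ↔ x ∈ w := by
        intro x
        rw [hKdef, PySem.Dict.keys_counter]
        exact PySem.Set.mem_ofList w x
      -- A's side reduces to pureA
      have hA : solution wood =
          pureA w K (((PySem.List.sorted (PySem.Dict.counter w).items (fun p => p.2) true).headD (0, 0)).2) := by
        unfold solution
        rw [if_neg hw]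
        simp only [hweq]
        rw [if_neg hfb]
        have hinv0 : InvA w (PySem.Set.empty : PySem.Set (Int × Int))
            (((PySem.List.sorted (PySem.Dict.counter w).items (fun p => p.2) true).headD (0, 0)).2) := by
          intro p hp
          simp [PySem.Set.empty] at hp
        exact outerA_eq_pure w K K (PySem.Set.empty) _ hinv0
      -- B's side is foldC from the same initial value
      have hinit : ((PySem.List.sorted (PySem.Dict.counter w).items (fun p => p.2) true).headD (0, 0)).2 =
          (PySem.List.max? (bcounts wood) (fun y => y)).getD 0 := by
        rw [init_eq w hfb, binit_eq wood hfb]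
      rw [hA, hinit, alt_unfold]
      exact le_antisymm
        (pureA_le_foldC wood K hK _)
        (foldC_le_pureA wood K hK _)
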